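-- pv_equiv track=rewrite | github.com/momalsaleem/Parsehub | backend/database.py | _infer_regions_from_country_values
-- ===== SOURCE A (Python) =====
-- def _infer_regions_from_country_values(countries: list) -> list:
--     """Infer region buckets from country names when metadata.region is empty."""
--     if not countries:
--         return []
--
--     country_to_region = {
--         'US': 'NA',
--         'USA': 'NA',
--         'UNITED STATES': 'NA',
--         'CANADA': 'NA',
--         'MEXICO': 'LATAM',
--         'BRAZIL': 'LATAM',
--         'ARGENTINA': 'LATAM',
--         'CHILE': 'LATAM',
--         'COLOMBIA': 'LATAM',
--         'PERU': 'LATAM',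
--         'UK': 'EMEA',
--         'UNITED KINGDOM': 'EMEA',
--         'GREAT BRITAIN': 'EMEA',
--         'GERMANY': 'EMEA',
--         'FRANCE': 'EMEA',
--         'BELGIUM': 'EMEA',
--         'NETHERLANDS': 'EMEA',
--         'SPAIN': 'EMEA',
--         'ITALY': 'EMEA',
--         'POLAND': 'EMEA',
--         'SWEDEN': 'EMEA',
--         'NORWAY': 'EMEA',
--         'DENMARK': 'EMEA',
--         'FINLAND': 'EMEA',
--         'AUSTRALIA': 'APAC',
--         'NEW ZEALAND': 'APAC',
--         'THAILAND': 'APAC',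
--         'SINGAPORE': 'APAC',
--         'MALAYSIA': 'APAC',
--         'INDONESIA': 'APAC',
--         'PHILIPPINES': 'APAC',
--         'VIETNAM': 'APAC',
--         'INDIA': 'APAC',
--         'CHINA': 'APAC',
--         'JAPAN': 'APAC',
--         'SOUTH KOREA': 'APAC',
--     }
--
--     inferred = set()
--     for country in countries:
--         if not country:
--             continue
--         normalized = str(country).strip().upper()
--         region = country_to_region.get(normalized)
--         if region:
--             inferred.add(region)
--
--     preferred_order = ['APAC', 'EMEA', 'LATAM', 'NA']
--     ordered = [r for r in preferred_order if r in inferred]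
--     ordered.extend(sorted([r for r in inferred if r not in preferred_order]))
--     return ordered
-- ===== SOURCE B (Python) =====
-- _REGION_GROUPS = [
--     ('APAC', frozenset({'AUSTRALIA', 'NEW ZEALAND', 'THAILAND', 'SINGAPORE',
--                         'MALAYSIA', 'INDONESIA', 'PHILIPPINES', 'VIETNAM',
--                         'INDIA', 'CHINA', 'JAPAN', 'SOUTH KOREA'})),
--     ('EMEA', frozenset({'UK', 'UNITED KINGDOM', 'GREAT BRITAIN', 'GERMANY',
--                         'FRANCE', 'BELGIUM', 'NETHERLANDS', 'SPAIN', 'ITALY',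
--                         'POLAND', 'SWEDEN', 'NORWAY', 'DENMARK', 'FINLAND'})),
--     ('LATAM', frozenset({'MEXICO', 'BRAZIL', 'ARGENTINA', 'CHILE',
--                          'COLOMBIA', 'PERU'})),
--     ('NA', frozenset({'US', 'USA', 'UNITED STATES', 'CANADA'})),
-- ]
--
--
-- def _infer_regions_from_country_values(countries: list) -> list:
--     present = {str(c).strip().upper() for c in countries if c}
--     return [region for region, names in _REGION_GROUPS
--             if not names.isdisjoint(present)]
-- ===== Notes on version B (the rewrite author's own statement) =====
-- stated objective: alternative
-- what changed: B inverts A's data structure: instead of mapping each country through a country-to-region dict and then reordering the collected region set, B precomputes an ordered region-to-countries grouping, builds the set of normalized present countries once, and emits each region in preferred order iff its country group intersects that set.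
import Mathlib
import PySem

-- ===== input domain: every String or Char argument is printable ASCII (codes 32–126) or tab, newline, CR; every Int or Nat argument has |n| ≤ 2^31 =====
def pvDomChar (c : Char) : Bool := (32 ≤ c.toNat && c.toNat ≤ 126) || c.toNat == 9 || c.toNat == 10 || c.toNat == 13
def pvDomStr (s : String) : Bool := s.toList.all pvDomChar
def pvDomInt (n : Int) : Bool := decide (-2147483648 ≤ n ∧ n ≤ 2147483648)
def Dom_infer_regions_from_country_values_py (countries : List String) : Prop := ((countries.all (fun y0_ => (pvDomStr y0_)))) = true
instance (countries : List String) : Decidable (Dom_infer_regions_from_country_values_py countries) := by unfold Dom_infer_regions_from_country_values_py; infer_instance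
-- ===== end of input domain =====

-- B replaces A's country→region dict pass + reorder by walking an ordered region→countries
-- grouping against the set of normalized present countries (objective: alternative).


-- str(c).strip().upper() — the normalization both Pythons apply to a country value
def pvNorm (c : String) : String := PySem.Str.upper (PySem.Str.strip c)

-- ===== PORT A =====
-- the country_to_region dict literal (distinct keys)
def pvTableList : List (String × String) := [
  ("US", "NA"), ("USA", "NA"), ("UNITED STATES", "NA"), ("CANADA", "NA"),
  ("MEXICO", "LATAM"), ("BRAZIL", "LATAM"), ("ARGENTINA", "LATAM"), ("CHILE", "LATAM"),
  ("COLOMBIA", "LATAM"), ("PERU", "LATAM"),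
  ("UK", "EMEA"), ("UNITED KINGDOM", "EMEA"), ("GREAT BRITAIN", "EMEA"), ("GERMANY", "EMEA"),
  ("FRANCE", "EMEA"), ("BELGIUM", "EMEA"), ("NETHERLANDS", "EMEA"), ("SPAIN", "EMEA"),
  ("ITALY", "EMEA"), ("POLAND", "EMEA"), ("SWEDEN", "EMEA"), ("NORWAY", "EMEA"),
  ("DENMARK", "EMEA"), ("FINLAND", "EMEA"),
  ("AUSTRALIA", "APAC"), ("NEW ZEALAND", "APAC"), ("THAILAND", "APAC"), ("SINGAPORE", "APAC"),
  ("MALAYSIA", "APAC"), ("INDONESIA", "APAC"), ("PHILIPPINES", "APAC"), ("VIETNAM", "APAC"),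
  ("INDIA", "APAC"), ("CHINA", "APAC"), ("JAPAN", "APAC"), ("SOUTH KOREA", "APAC")]

def pvCountryToRegion : PySem.Dict String String := PySem.Dict.mk pvTableList

-- the body of A's for-loop
def pvStepA (s : PySem.Set String) (country : String) : PySem.Set String :=
  if country = "" then s
  else
    let normalized := pvNorm country
    match pvCountryToRegion.get? normalized with
    | some region => if region = "" then s else PySem.Set.add s region
    | none => s

def infer_regions_from_country_values_py (countries : List String) : List String :=
  if countries = [] then []
  else
    let inferred : PySem.Set String := countries.foldl pvStepA PySem.Set.empty
    let preferredOrder : List String := ["APAC", "EMEA", "LATAM", "NA"]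
    let ordered := preferredOrder.filter (fun r => PySem.Set.contains inferred r)
    ordered ++ PySem.List.sorted
      (inferred.filter (fun r => !(preferredOrder.contains r))) (fun x => x) false

-- ===== PORT B =====
def pvApacList : List String := ["AUSTRALIA", "NEW ZEALAND", "THAILAND", "SINGAPORE",
  "MALAYSIA", "INDONESIA", "PHILIPPINES", "VIETNAM", "INDIA", "CHINA", "JAPAN", "SOUTH KOREA"]
def pvEmeaList : List String := ["UK", "UNITED KINGDOM", "GREAT BRITAIN", "GERMANY", "FRANCE",
  "BELGIUM", "NETHERLANDS", "SPAIN", "ITALY", "POLAND", "SWEDEN", "NORWAY", "DENMARK", "FINLAND"]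
def pvLatamList : List String := ["MEXICO", "BRAZIL", "ARGENTINA", "CHILE", "COLOMBIA", "PERU"]
def pvNaList : List String := ["US", "USA", "UNITED STATES", "CANADA"]

def pvRegionGroups : List (String × PySem.Set String) := [
  ("APAC", PySem.Set.ofList pvApacList),
  ("EMEA", PySem.Set.ofList pvEmeaList),
  ("LATAM", PySem.Set.ofList pvLatamList),
  ("NA", PySem.Set.ofList pvNaList)]

def infer_regions_from_country_values_py_alt (countries : List String) : List String :=
  let present : PySem.Set String :=
    PySem.Set.ofList ((countries.filter (fun c => c ≠ "")).map pvNorm)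
  (pvRegionGroups.filter (fun g => !(PySem.Set.isdisjoint g.2 present))).map Prod.fst

-- ===== PRECONDITION & SPEC =====
def Spec_infer_regions_from_country_values_py (countries : List String) (out : List String) : Prop := out = infer_regions_from_country_values_py_alt countries
instance (countries : List String) (out : List String) : Decidable (Spec_infer_regions_from_country_values_py countries out) := by unfold Spec_infer_regions_from_country_values_py; infer_instance

-- ===== CLAIM (what is proved, stated in full; the proofs are below) =====
def Claim_equal_infer_regions_from_country_values_py : Prop := ∀ (countries : List String), Dom_infer_regions_from_country_values_py countries → Spec_infer_regions_from_country_values_py countries (infer_regions_from_country_values_py countries)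

-- ===== LEMMAS AND PROOFS =====

lemma pv_get_some_mem (l : List (String × String)) (s r : String)
    (h : (PySem.Dict.mk l).get? s = some r) : (s, r) ∈ l := by
  induction l with
  | nil => simp [PySem.Dict.get?] at h
  | cons p rest ih =>
    obtain ⟨a, b⟩ := p
    rw [PySem.Dict.get?_mk_cons] at h
    by_cases hk : (a == s) = true
    · have hs : a = s := beq_iff_eq.mp hk
      simp [hk] at h
      subst hs; subst h
      exact List.mem_cons_self ..
    · simp [hk] at h
      exact List.mem_cons_of_mem _ (ih h)

lemma pv_get_iff (s r : String) :
    pvCountryToRegion.get? s = some r ↔ (s, r) ∈ pvTableList := by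
  constructor
  · exact pv_get_some_mem pvTableList s r
  · intro h
    exact PySem.Dict.get?_of_mem_items pvCountryToRegion h (by decide)

lemma pv_values (s r : String) (h : pvCountryToRegion.get? s = some r) :
    r = "APAC" ∨ r = "EMEA" ∨ r = "LATAM" ∨ r = "NA" := by
  have hm := (pv_get_iff s r).mp h
  have hv : ∀ p ∈ pvTableList, (p.2 = "APAC" ∨ p.2 = "EMEA" ∨ p.2 = "LATAM" ∨ p.2 = "NA") := by
    decide
  exact hv (s, r) hm

lemma pv_mem_step (acc : PySem.Set String) (c r : String) :
    r ∈ pvStepA acc c ↔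
      r ∈ acc ∨ (c ≠ "" ∧ r ≠ "" ∧ pvCountryToRegion.get? (pvNorm c) = some r) := by
  by_cases hc : c = ""
  · simp [pvStepA, hc]
  · have hstep : pvStepA acc c = (match pvCountryToRegion.get? (pvNorm c) with
        | some region => if region = "" then acc else PySem.Set.add acc region
        | none => acc) := by
      unfold pvStepA
      rw [if_neg hc]
    rw [hstep]
    cases hg : pvCountryToRegion.get? (pvNorm c) with
    | none => simp [hc]
    | some reg =>
      show r ∈ (if reg = "" then acc else PySem.Set.add acc reg) ↔
        r ∈ acc ∨ (c ≠ "" ∧ r ≠ "" ∧ some reg = some r)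
      by_cases hreg : reg = ""
      · subst hreg
        rw [if_pos rfl]
        constructor
        · exact Or.inl
        · rintro (h | ⟨-, hne, hr⟩)
          · exact h
          · exact absurd (Option.some.inj hr).symm hne
      · rw [if_neg hreg, PySem.Set.mem_add]
        constructor
        · rintro (h | rfl)
          · exact Or.inl h
          · exact Or.inr ⟨hc, hreg, rfl⟩
        · rintro (h | ⟨-, -, hr⟩)
          · exact Or.inl h
          · exact Or.inr (Option.some.inj hr).symm

lemma pv_mem_inferred (cs : List String) (acc : PySem.Set String) (r : String) :
    r ∈ cs.foldl pvStepA acc ↔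
      r ∈ acc ∨ ∃ c ∈ cs, c ≠ "" ∧ r ≠ "" ∧ pvCountryToRegion.get? (pvNorm c) = some r := by
  induction cs generalizing acc with
  | nil => simp
  | cons c cs ih =>
    rw [List.foldl_cons, ih, pv_mem_step]
    simp only [List.mem_cons]
    constructor
    · rintro ((h | h) | ⟨x, hx, h⟩)
      · exact Or.inl h
      · exact Or.inr ⟨c, Or.inl rfl, h⟩
      · exact Or.inr ⟨x, Or.inr hx, h⟩
    · rintro (h | ⟨x, rfl | hx, h⟩)
      · exact Or.inl (Or.inl h)
      · exact Or.inl (Or.inr h)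
      · exact Or.inr ⟨x, hx, h⟩

lemma pv_group_apac (s : String) : (s, "APAC") ∈ pvTableList ↔ s ∈ pvApacList := by
  simp [pvTableList, pvApacList, Prod.mk.injEq]
lemma pv_group_emea (s : String) : (s, "EMEA") ∈ pvTableList ↔ s ∈ pvEmeaList := by
  simp [pvTableList, pvEmeaList, Prod.mk.injEq]
lemma pv_group_latam (s : String) : (s, "LATAM") ∈ pvTableList ↔ s ∈ pvLatamList := by
  simp [pvTableList, pvLatamList, Prod.mk.injEq]
lemma pv_group_na (s : String) : (s, "NA") ∈ pvTableList ↔ s ∈ pvNaList := by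
  simp [pvTableList, pvNaList, Prod.mk.injEq]

lemma pv_contains_eq (countries : List String) (r : String) (g : List String)
    (hr : r ≠ "") (hgr : ∀ s, (s, r) ∈ pvTableList ↔ s ∈ g) :
    PySem.Set.contains (countries.foldl pvStepA PySem.Set.empty) r
      = !(PySem.Set.isdisjoint (PySem.Set.ofList g)
           (PySem.Set.ofList ((countries.filter (fun c => c ≠ "")).map pvNorm))) := by
  rw [Bool.eq_iff_iff]
  simp only [PySem.Set.contains, PySem.Set.isdisjoint, Bool.not_not,
    List.contains_iff_mem, List.any_eq_true, PySem.Set.mem_ofList, List.mem_map,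
    List.mem_filter, decide_eq_true_eq]
  rw [pv_mem_inferred]
  constructor
  · rintro (h | ⟨c, hc, hne, _, hget⟩)
    · simp [PySem.Set.empty] at h
    · exact ⟨pvNorm c, (hgr _).mp ((pv_get_iff _ _).mp hget), c, ⟨hc, hne⟩, rfl⟩
  · rintro ⟨n, hng, c, ⟨hc, hne⟩, hn⟩
    exact Or.inr ⟨c, hc, hne, hr, (pv_get_iff _ _).mpr ((hgr _).mpr (hn ▸ hng))⟩

-- ===== VERDICT (by name: the statement is the Claim_ definition above) =====
theorem infer_regions_from_country_values_py_spec : Claim_equal_infer_regions_from_country_values_py := by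
  intro countries _
  unfold Spec_infer_regions_from_country_values_py
  by_cases hc : countries = []
  · subst hc; decide
  · unfold infer_regions_from_country_values_py infer_regions_from_country_values_py_alt
    rw [if_neg hc]
    have hnil : (countries.foldl pvStepA PySem.Set.empty).filter
        (fun r => !((["APAC", "EMEA", "LATAM", "NA"] : List String).contains r)) = [] := by
      rw [List.filter_eq_nil_iff]
      intro r hrm
      have := (pv_mem_inferred countries PySem.Set.empty r).mp hrm
      rcases this with h | ⟨c, _, _, _, hget⟩
      · simp [PySem.Set.empty] at h
      · rcases pv_values _ _ hget with rfl | rfl | rfl | rfl <;> decide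
    have h1 := pv_contains_eq countries "APAC" pvApacList (by decide) pv_group_apac
    have h2 := pv_contains_eq countries "EMEA" pvEmeaList (by decide) pv_group_emea
    have h3 := pv_contains_eq countries "LATAM" pvLatamList (by decide) pv_group_latam
    have h4 := pv_contains_eq countries "NA" pvNaList (by decide) pv_group_na
    simp only [hnil, pvRegionGroups, List.filter_cons, List.filter_nil,
      h1, h2, h3, h4]
    have hs : (PySem.List.sorted ([] : List String) (fun x => x) false) = [] := rfl
    cases PySem.Set.isdisjoint (PySem.Set.ofList pvApacList) (PySem.Set.ofList ((countries.filter (fun c => c ≠ "")).map pvNorm)) <;>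
    cases PySem.Set.isdisjoint (PySem.Set.ofList pvEmeaList) (PySem.Set.ofList ((countries.filter (fun c => c ≠ "")).map pvNorm)) <;>
    cases PySem.Set.isdisjoint (PySem.Set.ofList pvLatamList) (PySem.Set.ofList ((countries.filter (fun c => c ≠ "")).map pvNorm)) <;>
    cases PySem.Set.isdisjoint (PySem.Set.ofList pvNaList) (PySem.Set.ofList ((countries.filter (fun c => c ≠ "")).map pvNorm)) <;>
      simp [hs]
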